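-- pv_equiv track=rewrite | github.com/AliMuhammadAsad/DSII-Project-FusionTrees | fusion_tree.py | getConst
-- ===== SOURCE A (Python) =====
-- def getConst(b_bits) -> tuple:
--     ''' A method that calculates the constant 'm' and the corresponding 'm_bits' given the list of distinguishing 'b_bits'
--     Args:
--     - self: mandatory reference to this object
--     - b_bits: the bits that are different between all pairs of keys
--
--     Returns: a tuple containing a list 'm_bits' corresponding to the constant 'm', and the constant 'm'
--     '''
--     r = len(b_bits) # Total number of different bits
--     m_bits = [0 for i in range(r)] # Initializing a list to store m_bits with default values of 0 and length equal to r
--     for t in range(r): # iterating over the number of different bits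
--         mt = 0 # mt which counts the m bits for each iteration
--         flag = True # setting a flag
--         while flag:
--             flag = False
--             for i in range(r):
--                 if flag:
--                     break
--                 for j in range(r):
--                     if flag:
--                         break
--                     for k in range(t):
--                         # if mt equal the difference between b_bits[i], b_bits[j] plus m_bits[k], set flag to True
--                         if mt == b_bits[i] - b_bits[j] + m_bits[k]:
--                             flag = True
--                             break
--             if flag == True: #If flag is true, increment mt
--                 mt += 1
--         m_bits[t] = mt #set the t-th element of m_bits to mt
--     m = 0
--     for i in m_bits: # iterate over m_bits
--         m |= 1 << i # set the bit at position i in m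
--     return m_bits, m
-- ===== SOURCE B (Python) =====
-- def getConst(b_bits) -> tuple:
--     r = len(b_bits)
--     # all pairwise differences, computed once
--     D = {x - y for x in b_bits for y in b_bits}
--     F = set()          # forbidden values, carried across iterations
--     m_bits = []
--     for _ in range(r):
--         mt = 0
--         while mt in F:
--             mt += 1
--         m_bits.append(mt)
--         F.update(d + mt for d in D)
--     m = 0
--     for i in m_bits:
--         m |= 1 << i
--     return m_bits, m
-- ===== Notes on version B (the rewrite author's own statement) =====
-- stated objective: faster
-- what changed: Builds the pairwise-difference set D once and carries a forbidden-value set F incrementally across the t-loop (mt = first value not in F, then F gains d+mt for d in D), replacing A's restart-from-scratch while loop with a triple-nested rescan of all (i,j,k) per candidate mt.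
import Mathlib
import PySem

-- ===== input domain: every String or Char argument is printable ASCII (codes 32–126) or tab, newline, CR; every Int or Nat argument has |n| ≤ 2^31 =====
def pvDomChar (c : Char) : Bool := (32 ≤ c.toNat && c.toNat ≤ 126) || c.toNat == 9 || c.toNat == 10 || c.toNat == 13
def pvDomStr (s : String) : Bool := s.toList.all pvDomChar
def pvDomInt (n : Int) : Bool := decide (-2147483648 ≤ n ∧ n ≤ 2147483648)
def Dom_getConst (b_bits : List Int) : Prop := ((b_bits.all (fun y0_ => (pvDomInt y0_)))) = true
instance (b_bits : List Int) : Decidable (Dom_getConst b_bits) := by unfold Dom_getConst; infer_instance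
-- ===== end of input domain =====

-- B maintains the forbidden set incrementally (difference set built once) instead of A's
-- per-candidate triple-nested rescan; equal return values, measured asymptotically faster.

-- ===== PORT A =====
-- the triple-nested i/j/k loop with its break flags = first-hit existence scan
def aCond (b_bits m_bits : List Int) (r t : Nat) (mt : Int) : Bool :=
  (List.range r).any fun i =>
    (List.range r).any fun j =>
      (List.range t).any fun k =>
        mt == b_bits.getD i 0 - b_bits.getD j 0 + m_bits.getD k 0

-- the 'while flag' loop: keep incrementing mt while some triple matches.
-- fuel r*r*r+1 always suffices: at most r*r*t values are ever forbidden, so the loop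
-- stops with mt ≤ r*r*t < r*r*r+1 (fuel only makes the recursion structural).
def aFind (b_bits m_bits : List Int) (r t : Nat) : Nat → Int → Int
  | 0, mt => mt
  | fuel+1, mt => if aCond b_bits m_bits r t mt then aFind b_bits m_bits r t fuel (mt+1) else mt

def getConst (b_bits : List Int) : List Int × Int :=
  let r := b_bits.length
  let m_bits := (List.range r).foldl
    (fun mb t => mb.set t (aFind b_bits mb r t (r*r*r+1) 0)) (List.replicate r 0)
  -- m_bits entries are always ≥ 0, so '1 << i' is exactly 1 <<< i.toNat here
  let m := m_bits.foldl (fun m i => PySem.Int.bor m ((1 : Int) <<< i.toNat)) 0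
  (m_bits, m)

-- ===== PORT B =====
-- 'while mt in F: mt += 1' (same fuel bound, F never has more than r*r*r elements)
def bMex (F : PySem.Set Int) : Nat → Int → Int
  | 0, mt => mt
  | fuel+1, mt => if F.contains mt then bMex F fuel (mt+1) else mt

def bStep (D : PySem.Set Int) (r : Nat) (st : List Int × PySem.Set Int) :
    List Int × PySem.Set Int :=
  let mt := bMex st.2 (r*r*r+1) 0
  (st.1 ++ [mt], PySem.Set.update st.2 (D.map (fun d => d + mt)))

def getConst_alt (b_bits : List Int) : List Int × Int :=
  let r := b_bits.length
  let D : PySem.Set Int := PySem.Set.ofList (b_bits.flatMap fun x => b_bits.map fun y => x - y)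
  let st := (List.range r).foldl (fun st _ => bStep D r st) ([], PySem.Set.empty)
  let m_bits := st.1
  let m := m_bits.foldl (fun m i => PySem.Int.bor m ((1 : Int) <<< i.toNat)) 0
  (m_bits, m)

-- ===== PRECONDITION & SPEC =====
def Spec_getConst (b_bits : List Int) (out : List Int × Int) : Prop := out = getConst_alt b_bits
instance (b_bits : List Int) (out : List Int × Int) : Decidable (Spec_getConst b_bits out) := by unfold Spec_getConst; infer_instance

-- ===== CLAIM (what is proved, stated in full; the proofs are below) =====
def Claim_equal_getConst : Prop := ∀ (b_bits : List Int), Dom_getConst b_bits → Spec_getConst b_bits (getConst b_bits)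

-- ===== LEMMAS AND PROOFS =====

theorem getD_append_replicate_zero (xs : List Int) (n k : Nat) :
    (xs ++ List.replicate n 0).getD k 0 = xs.getD k 0 := by
  by_cases h : k < xs.length
  · simp [List.getD, List.getElem?_append_left h]
  · simp only [List.getD, List.getElem?_append, h]
    rw [List.getElem?_eq_none (by omega : xs.length ≤ k)]
    cases hk : (List.replicate n (0:Int))[k - xs.length]? with
    | none => simp
    | some v =>
      have := List.getElem?_eq_some_iff.mp hk
      obtain ⟨h1, h2⟩ := this
      simp_all [List.getElem_replicate]

theorem aCond_iff (b_bits m_bits : List Int) (r t : Nat) (mt : Int) :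
    aCond b_bits m_bits r t mt = true ↔
      ∃ i < r, ∃ j < r, ∃ k < t,
        mt = b_bits.getD i 0 - b_bits.getD j 0 + m_bits.getD k 0 := by
  simp [aCond, List.any_eq_true, List.mem_range]

theorem mem_contains (s : PySem.Set Int) (x : Int) : (x ∈ s) ↔ s.contains x = true := by
  simp

theorem find_eq_mex (b_bits m_bits : List Int) (r t : Nat) (F : PySem.Set Int)
    (h : ∀ x : Int, F.contains x = aCond b_bits m_bits r t x) :
    ∀ (fuel : Nat) (mt : Int), aFind b_bits m_bits r t fuel mt = bMex F fuel mt := by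
  intro fuel
  induction fuel with
  | zero => intro mt; rfl
  | succ n ih =>
    intro mt
    simp only [aFind, bMex, h mt]
    by_cases hc : aCond b_bits m_bits r t mt = true
    · simp [hc, ih]
    · simp [hc]

-- membership in B's difference set D
theorem mem_D_iff (b_bits : List Int) (x : Int) :
    x ∈ PySem.Set.ofList (b_bits.flatMap fun a => b_bits.map fun c => a - c) ↔
      ∃ i < b_bits.length, ∃ j < b_bits.length, x = b_bits.getD i 0 - b_bits.getD j 0 := by
  rw [PySem.Set.mem_ofList]
  simp only [List.mem_flatMap, List.mem_map]
  constructor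
  · rintro ⟨a, ha, c, hc, rfl⟩
    obtain ⟨i, hi, rfl⟩ := List.mem_iff_getElem.mp ha
    obtain ⟨j, hj, rfl⟩ := List.mem_iff_getElem.mp hc
    exact ⟨i, hi, j, hj, by simp [List.getD, hi, hj]⟩
  · rintro ⟨i, hi, j, hj, rfl⟩
    exact ⟨b_bits[i], List.getElem_mem hi, b_bits[j], List.getElem_mem hj,
      by simp [List.getD, hi, hj]⟩

theorem getD_append_singleton_lt (xs : List Int) (v : Int) (k : Nat) (h : k < xs.length) :
    (xs ++ [v]).getD k 0 = xs.getD k 0 := by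
  simp [List.getD, List.getElem?_append_left h]

theorem getD_append_singleton_self (xs : List Int) (v : Int) :
    (xs ++ [v]).getD xs.length 0 = v := by
  simp [List.getD]

-- the main loop invariant, by induction on t
theorem loop_inv (b_bits : List Int) (t : Nat) (ht : t ≤ b_bits.length) :
    let r := b_bits.length
    let D : PySem.Set Int := PySem.Set.ofList (b_bits.flatMap fun a => b_bits.map fun c => a - c)
    let A := (List.range t).foldl
      (fun mb t' => mb.set t' (aFind b_bits mb r t' (r*r*r+1) 0)) (List.replicate r 0)
    let st := (List.range t).foldl (fun st _ => bStep D r st) ([], PySem.Set.empty)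
    A = st.1 ++ List.replicate (r - t) 0 ∧ st.1.length = t ∧
      (∀ x : Int, st.2.contains x = aCond b_bits A r t x) := by
  intro r D
  induction t with
  | zero =>
    refine ⟨by simp, rfl, ?_⟩
    intro x
    have : aCond b_bits (List.replicate r 0) r 0 x = false := by
      simp [aCond]
    simp [PySem.Set.empty, this, List.range_zero]
  | succ t ih =>
    have ht' : t ≤ r := Nat.le_of_succ_le ht
    obtain ⟨hA, hlen, hF⟩ := ih ht'
    simp only [List.range_succ, List.foldl_append, List.foldl_cons, List.foldl_nil]
    set A := (List.range t).foldl
      (fun mb t' => mb.set t' (aFind b_bits mb r t' (r*r*r+1) 0)) (List.replicate r 0) with hAdef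
    set st := (List.range t).foldl (fun st _ => bStep D r st) ([], PySem.Set.empty) with hstdef
    -- the chosen values coincide
    have hmt : aFind b_bits A r t (r*r*r+1) 0 = bMex st.2 (r*r*r+1) 0 :=
      find_eq_mex b_bits A r t st.2 hF (r*r*r+1) 0
    set mt := bMex st.2 (r*r*r+1) 0 with hmtdef
    have hAgetD : ∀ k : Nat, A.getD k 0 = st.1.getD k 0 := by
      intro k; rw [hA, getD_append_replicate_zero]
    have hA' : A.set t (aFind b_bits A r t (r*r*r+1) 0)
        = (st.1 ++ [mt]) ++ List.replicate (r - (t+1)) 0 := by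
      rw [hmt, hA]
      have hrep : List.replicate (r - t) (0:Int) = 0 :: List.replicate (r - (t+1)) 0 := by
        have : r - t = (r - (t+1)) + 1 := by omega
        rw [this, List.replicate_succ]
      rw [hrep]
      rw [show t = st.1.length from hlen.symm, List.set_append_right _ _ (le_refl _)]
      simp
    have hnewlen : (st.1 ++ [mt]).length = t + 1 := by simp [hlen]
    refine ⟨by simpa [bStep] using hA', by simpa [bStep] using hnewlen, ?_⟩
    intro x
    show (PySem.Set.update st.2 (D.map (fun d => d + mt))).contains x
        = aCond b_bits (A.set t (aFind b_bits A r t (r*r*r+1) 0)) r (t+1) x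
    have hnewgetD : ∀ k : Nat,
        (A.set t (aFind b_bits A r t (r*r*r+1) 0)).getD k 0 = (st.1 ++ [mt]).getD k 0 := by
      intro k; rw [hA', getD_append_replicate_zero]
    rw [Bool.eq_iff_iff, ← mem_contains, PySem.Set.mem_update, aCond_iff]
    constructor
    · rintro (hx | hx)
      · have hc : st.2.contains x = true := (mem_contains st.2 x).mp hx
        rw [hF] at hc
        obtain ⟨i, hi, j, hj, k, hk, hx⟩ := (aCond_iff b_bits A r t x).mp hc
        refine ⟨i, hi, j, hj, k, Nat.lt_succ_of_lt hk, ?_⟩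
        rw [hx, hAgetD k, hnewgetD k, getD_append_singleton_lt _ _ _ (by omega)]
      · simp only [List.mem_map] at hx
        obtain ⟨d, hd, rfl⟩ := hx
        obtain ⟨i, hi, j, hj, rfl⟩ := (mem_D_iff b_bits d).mp hd
        refine ⟨i, hi, j, hj, t, Nat.lt_succ_self t, ?_⟩
        rw [hnewgetD t, show t = st.1.length from hlen.symm, getD_append_singleton_self]
    · rintro ⟨i, hi, j, hj, k, hk, hx⟩
      by_cases hkt : k < t
      · left
        rw [mem_contains, hF, aCond_iff]
        refine ⟨i, hi, j, hj, k, hkt, ?_⟩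
        rw [hx, hnewgetD k, getD_append_singleton_lt _ _ _ (by omega), hAgetD k]
      · right
        have hkeq : k = t := by omega
        subst hkeq
        simp only [List.mem_map]
        refine ⟨b_bits.getD i 0 - b_bits.getD j 0, (mem_D_iff b_bits _).mpr ⟨i, hi, j, hj, rfl⟩, ?_⟩
        rw [hx, hnewgetD k, show k = st.1.length from hlen.symm, getD_append_singleton_self]

-- ===== VERDICT (by name: the statement is the Claim_ definition above) =====
theorem getConst_spec : Claim_equal_getConst := by
  intro b_bits _
  unfold Spec_getConst getConst getConst_alt
  obtain ⟨hA, hlen, _⟩ := loop_inv b_bits b_bits.length (le_refl _)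
  simp only []
  rw [hA]
  simp
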